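-- pv_equiv track=rewrite | github.com/yys7517/VsCodePython | CosPro/week14_6.py | solution
-- ===== SOURCE A (Python) =====
-- def solution( people ):
--     # [S, M, L, XL] 순으로 리스트에 담아 return 합니다
--     counter = [ 0 for i in range(4) ]
--     for i in people :
--         if ( i < 95 ) :
--             counter[0] += 1
--         elif( i >= 95 and i < 100 ) :
--             counter[1] += 1
--         elif( i >= 100 and i < 105 ) :
--             counter[2] += 1
--         else :
--             counter[3] += 1
--
--     return counter
-- ===== SOURCE B (Python) =====
-- def solution(people):
--     return [sum(1 for p in people if p < 95),
--             sum(1 for p in people if 95 <= p < 100),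
--             sum(1 for p in people if 100 <= p < 105),
--             sum(1 for p in people if p >= 105)]
-- ===== Notes on version B (the rewrite author's own statement) =====
-- stated objective: idiomatic
-- what changed: Replaced the single pass mutating a 4-slot counter list via an if/elif chain with four independent generator-sum counts, one per bucket.
import Mathlib
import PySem

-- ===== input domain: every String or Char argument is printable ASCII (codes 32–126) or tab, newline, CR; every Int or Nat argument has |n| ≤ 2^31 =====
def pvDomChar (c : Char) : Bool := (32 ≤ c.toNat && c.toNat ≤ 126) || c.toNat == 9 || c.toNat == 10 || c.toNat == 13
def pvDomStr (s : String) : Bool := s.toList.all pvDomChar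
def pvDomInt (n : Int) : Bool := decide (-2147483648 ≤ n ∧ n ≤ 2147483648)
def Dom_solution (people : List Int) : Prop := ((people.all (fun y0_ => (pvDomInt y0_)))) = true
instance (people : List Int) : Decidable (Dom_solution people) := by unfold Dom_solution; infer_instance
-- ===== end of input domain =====

-- B replaces A's single-pass if/elif counter mutation with four independent per-bucket counts (idiomatic; same cost).


-- ===== PORT A =====
-- counter = [0]*4; for i in people: if/elif chain bumps one slot (list update ported as List.set)
def solution (people : List Int) : List Int :=
  people.foldl (fun counter i =>
    if i < 95 then counter.set 0 (counter.getD 0 0 + 1)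
    else if 95 ≤ i ∧ i < 100 then counter.set 1 (counter.getD 1 0 + 1)
    else if 100 ≤ i ∧ i < 105 then counter.set 2 (counter.getD 2 0 + 1)
    else counter.set 3 (counter.getD 3 0 + 1))
    (List.replicate 4 0)

-- ===== PORT B =====
-- four sum(1 for p in people if <range>) generator sums, ported as List.countP
def solution_alt (people : List Int) : List Int :=
  [ (people.countP (fun p => p < 95) : Int),
    (people.countP (fun p => 95 ≤ p ∧ p < 100) : Int),
    (people.countP (fun p => 100 ≤ p ∧ p < 105) : Int),
    (people.countP (fun p => 105 ≤ p) : Int) ]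

-- ===== PRECONDITION & SPEC =====
def Spec_solution (people : List Int) (out : List Int) : Prop := out = solution_alt people
instance (people : List Int) (out : List Int) : Decidable (Spec_solution people out) := by unfold Spec_solution; infer_instance

-- ===== CLAIM (what is proved, stated in full; the proofs are below) =====
def Claim_equal_solution : Prop := ∀ (people : List Int), Dom_solution people → Spec_solution people (solution people)

-- ===== LEMMAS AND PROOFS =====
theorem solution_fold_state (people : List Int) (a b c d : Int) :
    people.foldl (fun counter i =>
      if i < 95 then counter.set 0 (counter.getD 0 0 + 1)
      else if 95 ≤ i ∧ i < 100 then counter.set 1 (counter.getD 1 0 + 1)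
      else if 100 ≤ i ∧ i < 105 then counter.set 2 (counter.getD 2 0 + 1)
      else counter.set 3 (counter.getD 3 0 + 1)) [a, b, c, d]
    = [ a + people.countP (fun p => p < 95),
        b + people.countP (fun p => 95 ≤ p ∧ p < 100),
        c + people.countP (fun p => 100 ≤ p ∧ p < 105),
        d + people.countP (fun p => 105 ≤ p) ] := by
  induction people generalizing a b c d with
  | nil => simp
  | cons x xs ih =>
    simp only [List.foldl_cons]
    split_ifs with h1 h2 h3
    · rw [show ([a, b, c, d].set 0 (([a, b, c, d].getD 0 0) + 1)) = [a + 1, b, c, d] from rfl, ih]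
      simp only [List.cons.injEq, List.countP_cons]
      have e1 : decide (x < 95) = true := by simp; omega
      have e2 : decide (95 ≤ x ∧ x < 100) = false := by simp; omega
      have e3 : decide (100 ≤ x ∧ x < 105) = false := by simp; omega
      have e4 : decide (105 ≤ x) = false := by simp; omega
      simp only [e1, e2, e3, e4, if_true]
      push_cast; refine ⟨by ring, rfl, rfl, rfl, trivial⟩
    · rw [show ([a, b, c, d].set 1 (([a, b, c, d].getD 1 0) + 1)) = [a, b + 1, c, d] from rfl, ih]
      simp only [List.cons.injEq, List.countP_cons]
      have e1 : decide (x < 95) = false := by simp; omega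
      have e2 : decide (95 ≤ x ∧ x < 100) = true := by simp; omega
      have e3 : decide (100 ≤ x ∧ x < 105) = false := by simp; omega
      have e4 : decide (105 ≤ x) = false := by simp; omega
      simp only [e1, e2, e3, e4, if_true]
      push_cast; refine ⟨rfl, by ring, rfl, rfl, trivial⟩
    · rw [show ([a, b, c, d].set 2 (([a, b, c, d].getD 2 0) + 1)) = [a, b, c + 1, d] from rfl, ih]
      simp only [List.cons.injEq, List.countP_cons]
      have e1 : decide (x < 95) = false := by simp; omega
      have e2 : decide (95 ≤ x ∧ x < 100) = false := by simp; omega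
      have e3 : decide (100 ≤ x ∧ x < 105) = true := by simp; omega
      have e4 : decide (105 ≤ x) = false := by simp; omega
      simp only [e1, e2, e3, e4, if_true]
      push_cast; refine ⟨rfl, rfl, by ring, rfl, trivial⟩
    · rw [show ([a, b, c, d].set 3 (([a, b, c, d].getD 3 0) + 1)) = [a, b, c, d + 1] from rfl, ih]
      simp only [List.cons.injEq, List.countP_cons]
      have e1 : decide (x < 95) = false := by simp; omega
      have e2 : decide (95 ≤ x ∧ x < 100) = false := by simp; omega
      have e3 : decide (100 ≤ x ∧ x < 105) = false := by simp; omega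
      have e4 : decide (105 ≤ x) = true := by simp; omega
      simp only [e1, e2, e3, e4, if_true]
      push_cast; refine ⟨rfl, rfl, rfl, by ring, trivial⟩

-- ===== VERDICT (by name: the statement is the Claim_ definition above) =====
theorem solution_spec : Claim_equal_solution := by
  intro people _
  unfold Spec_solution solution solution_alt
  have : (List.replicate 4 (0 : Int)) = [0, 0, 0, 0] := by simp [List.replicate]
  rw [this, solution_fold_state]
  simp
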